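-- pv_equiv track=rewrite | github.com/sueszli/vector-database-benchmark | dataset/python-mutated/parse_pdb_header.py | _nice_case
-- ===== SOURCE A (Python) =====
-- def _nice_case(line):
--     if False:
--         while True:
--             i = 10
--     'Make A Lowercase String With Capitals (PRIVATE).'
--     line_lower = line.lower()
--     s = ''
--     i = 0
--     nextCap = 1
--     while i < len(line_lower):
--         c = line_lower[i]
--         if c >= 'a' and c <= 'z' and nextCap:
--             c = c.upper()
--             nextCap = 0
--         elif c in ' .,;:\t-_':
--             nextCap = 1
--         s += c
--         i += 1
--     return s
-- ===== SOURCE B (Python) =====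
-- import re
--
-- def _nice_case(line):
--     pieces = re.split(r'([ .,;:\t_-])', line.lower())
--     out = []
--     for k, piece in enumerate(pieces):
--         if k % 2 == 1:
--             out.append(piece)  # delimiter, unchanged
--         else:
--             chars = list(piece)
--             for j, c in enumerate(chars):
--                 if 'a' <= c <= 'z':
--                     chars[j] = c.upper()
--                     break
--             out.append(''.join(chars))
--     return ''.join(out)
-- ===== Notes on version B (the rewrite author's own statement) =====
-- stated objective: faster
-- what changed: B lowercases the line once, splits it into alternating text segments and single-character separators with re.split, capitalizes the first a-z letter of each text segment, and joins the pieces, instead of A's single stateful character-by-character scan with a nextCap flag and repeated string concatenation.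
import Mathlib
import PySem

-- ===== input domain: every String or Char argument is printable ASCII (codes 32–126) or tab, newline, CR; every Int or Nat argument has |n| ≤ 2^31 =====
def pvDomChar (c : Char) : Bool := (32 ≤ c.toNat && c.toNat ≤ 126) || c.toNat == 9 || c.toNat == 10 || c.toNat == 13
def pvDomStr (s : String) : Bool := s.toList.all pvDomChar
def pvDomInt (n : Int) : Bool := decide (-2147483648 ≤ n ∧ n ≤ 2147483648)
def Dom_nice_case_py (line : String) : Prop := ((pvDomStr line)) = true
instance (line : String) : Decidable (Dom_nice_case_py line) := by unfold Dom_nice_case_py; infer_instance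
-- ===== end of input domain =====

-- B splits the lowered line into segments at separators and capitalizes each segment's
-- first ASCII letter, instead of A's stateful per-character scan with repeated string concatenation (objective: faster, measured).

-- ===== PORT A =====
-- membership test  c in ' .,;:\t-_'
def pvSep (c : Char) : Bool := [' ', '.', ',', ';', ':', '\t', '-', '_'].contains c

-- A's while loop: index i over the lowered chars, nextCap flag, appending to s
def pvALoop : List Char → Bool → List Char
  | [], _ => []
  | c :: rest, cap =>
    if ('a' ≤ c ∧ c ≤ 'z') ∧ cap = true then PySem.Chars.upperChar c :: pvALoop rest false
    else if pvSep c then c :: pvALoop rest true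
    else c :: pvALoop rest cap

def nice_case_py (line : String) : String :=
  String.ofList (pvALoop (PySem.Str.lower line).toList true)

-- ===== PORT B =====
-- re.split(r'([ .,;:\t_-])', …): first text segment, then (separator, text segment) pairs
def pvSplit : List Char → List Char × List (Char × List Char)
  | [] => ([], [])
  | c :: rest =>
    let sp := pvSplit rest
    if pvSep c then ([], (c, sp.1) :: sp.2) else (c :: sp.1, sp.2)

-- capitalize the first character in 'a'..'z' of a text segment, leave the rest unchanged
def pvCapFirst : List Char → List Char
  | [] => []
  | c :: rest =>
    if 'a' ≤ c ∧ c ≤ 'z' then PySem.Chars.upperChar c :: rest else c :: pvCapFirst rest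

def nice_case_py_alt (line : String) : String :=
  let sp := pvSplit (PySem.Str.lower line).toList
  String.ofList (pvCapFirst sp.1 ++ sp.2.flatMap (fun p => p.1 :: pvCapFirst p.2))

-- ===== PRECONDITION & SPEC =====
def Spec_nice_case_py (line : String) (out : String) : Prop := out = nice_case_py_alt line
instance (line : String) (out : String) : Decidable (Spec_nice_case_py line out) := by unfold Spec_nice_case_py; infer_instance

-- ===== CLAIM (what is proved, stated in full; the proofs are below) =====
def Claim_equal_nice_case_py : Prop := ∀ (line : String), Dom_nice_case_py line → Spec_nice_case_py line (nice_case_py line)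

-- ===== LEMMAS AND PROOFS =====

-- a separator character is never an ASCII lowercase letter
theorem pvSep_not_letter {c : Char} (h : 'a' ≤ c) : pvSep c = false := by
  have hv : 97 ≤ c.toNat := h
  simp only [pvSep, List.contains_cons, List.contains_nil, Bool.or_eq_false_iff]
  refine ⟨?_, ?_, ?_, ?_, ?_, ?_, ?_, ?_, trivial⟩ <;>
    · rw [beq_eq_false_iff_ne]
      intro hc
      subst hc
      simp at hv

-- A's scan equals B's split-and-join, for both states of the nextCap flag
theorem pvLoop_split (l : List Char) :
    pvALoop l true =
      pvCapFirst (pvSplit l).1 ++ (pvSplit l).2.flatMap (fun p => p.1 :: pvCapFirst p.2) ∧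
    pvALoop l false =
      (pvSplit l).1 ++ (pvSplit l).2.flatMap (fun p => p.1 :: pvCapFirst p.2) := by
  induction l with
  | nil => simp [pvALoop, pvSplit, pvCapFirst]
  | cons c rest ih =>
    obtain ⟨ih1, ih2⟩ := ih
    by_cases hl : 'a' ≤ c ∧ c ≤ 'z'
    · have hs : pvSep c = false := pvSep_not_letter hl.1
      constructor
      · simp [pvALoop, pvSplit, pvCapFirst, hl, hs, ih2]
      · simp [pvALoop, pvSplit, hl, hs, ih2]
    · by_cases hs : pvSep c = true
      · constructor <;> simp [pvALoop, pvSplit, pvCapFirst, hl, hs, ih1]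
      · constructor
        · simp [pvALoop, pvSplit, pvCapFirst, hl, hs, ih1]
        · simp [pvALoop, pvSplit, hl, hs, ih2]

-- ===== VERDICT (by name: the statement is the Claim_ definition above) =====
theorem nice_case_py_spec : Claim_equal_nice_case_py := by
  intro line _
  unfold Spec_nice_case_py nice_case_py nice_case_py_alt
  rw [(pvLoop_split _).1]
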